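-- pv_equiv track=rewrite | github.com/ecoon/ats_input_spec | ats_input_spec/source_reader.py | to_specname
-- ===== SOURCE A (Python) =====
-- def to_specname(inname):
--     name = inname.replace('_','-')
--     name = name.replace(' ','-')
--
--     chars = []
--     for i in range(len(name)):
--         if name[i].isupper():
--             if i != 0:
--                 if i+1 < len(name) and name[i+1].islower():
--                     chars.append('-')
--                 elif name[i-1].islower():
--                     chars.append('-')
--             elif i != 0 and i+1 == len(name):
--                 chars.append('-')
--
--         chars.append(name[i].lower())
--     res =  ''.join(chars)
--     if not res.endswith('-spec'):
--         res = res+'-spec'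
--     res = res.replace('--', '-')
--     return res
-- ===== SOURCE B (Python) =====
-- def to_specname(inname):
--     name = inname.replace('_', '-').replace(' ', '-')
--     n = len(name)
--     # Stage 1: collect the camel-case word boundaries (indices that get a dash).
--     breaks = [i for i in range(1, n)
--               if name[i].isupper()
--               and (name[i - 1].islower() or name[i + 1:i + 2].islower())]
--     # Stage 2: slice the name into words at those boundaries and join with dashes.
--     words = [name[a:b] for a, b in zip([0] + breaks, breaks + [n])]
--     res = '-'.join(words).lower()
--     if not res.endswith('-spec'):
--         res += '-spec'
--     return res.replace('--', '-')
-- ===== Notes on version B (the rewrite author's own statement) =====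
-- stated objective: faster
-- what changed: Replaced A's single character-appending scan (which decides and emits dashes inline while copying characters one by one into a list) by a staged split/join pipeline: first compute the list of camel-case boundary indices, then slice the name into words at those indices and join them with a dash separator, lowercasing the joined string once; the bulk slice/join/lower operations run in C instead of per-character Python bytecode.
import Mathlib
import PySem

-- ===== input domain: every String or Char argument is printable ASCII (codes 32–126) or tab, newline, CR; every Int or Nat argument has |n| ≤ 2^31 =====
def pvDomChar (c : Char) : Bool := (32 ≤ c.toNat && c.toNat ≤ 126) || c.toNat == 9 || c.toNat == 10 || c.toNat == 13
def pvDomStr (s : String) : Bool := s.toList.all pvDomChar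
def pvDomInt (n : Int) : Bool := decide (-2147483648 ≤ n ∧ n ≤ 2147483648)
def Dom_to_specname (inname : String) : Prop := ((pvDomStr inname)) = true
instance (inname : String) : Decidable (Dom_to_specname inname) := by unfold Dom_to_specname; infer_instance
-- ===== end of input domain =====

-- B replaces A's inline character-appending scan by a staged pipeline: compute the
-- camel boundary indices, slice the name into words there, join with dashes,
-- lower once (bulk slice/join instead of per-character appends). Objective: faster.

-- ===== PORT A =====
-- literal transliteration of A: index loop over range(len(name)) with chars.append
def to_specname (inname : String) : String :=
  let name := (PySem.Str.replace (PySem.Str.replace inname "_" "-") " " "-").toList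
  let n : Int := (name.length : Int)
  let chars : List Char :=
    (PySem.List.pyRange 0 n 1).foldl (fun chars i =>
      let chars :=
        if PySem.Chars.isupper (PySem.List.pyGetD name i ' ') then
          (if i ≠ 0 then
            (if i + 1 < n ∧ PySem.Chars.islower (PySem.List.pyGetD name (i+1) ' ') then
               chars ++ ['-']
             else if PySem.Chars.islower (PySem.List.pyGetD name (i-1) ' ') then
               chars ++ ['-']
             else chars)
           else if i ≠ 0 ∧ i + 1 = n then chars ++ ['-'] else chars)
        else chars
      chars ++ [PySem.Chars.lowerChar (PySem.List.pyGetD name i ' ')]) []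
  let res := chars
  let res := if ¬ (PySem.Chars.endswith res ("-spec".toList) = true) then res ++ ("-spec".toList) else res
  String.ofList (PySem.Chars.replace res ("--".toList) ("-".toList))

-- ===== PORT B =====
-- B-side helper: Python str.islower() on a whole string (exact on the ASCII domain:
-- at least one lowercase letter and no uppercase letter)
def strIslower (l : List Char) : Bool :=
  l.any PySem.Chars.islower && l.all (fun c => !PySem.Chars.isupper c)

def to_specname_alt (inname : String) : String :=
  let name := (PySem.Str.replace (PySem.Str.replace inname "_" "-") " " "-").toList
  let n : Int := (name.length : Int)
  -- Stage 1: the camel-case word boundaries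
  let breaks : List Int :=
    (PySem.List.pyRange 1 n 1).filter (fun i =>
      PySem.Chars.isupper (PySem.List.pyGetD name i ' ') &&
      (PySem.Chars.islower (PySem.List.pyGetD name (i-1) ' ') ||
       strIslower (PySem.List.slice name (some (i+1)) (some (i+2)))))
  -- Stage 2: slice into words at those boundaries, join with dashes, lower once
  let words : List (List Char) :=
    (List.zip ((0 : Int) :: breaks) (breaks ++ [n])).map
      (fun ab => PySem.List.slice name (some ab.1) (some ab.2))
  let res := (PySem.Chars.join ['-'] words).map PySem.Chars.lowerChar
  let res := if ¬ (PySem.Chars.endswith res ("-spec".toList) = true) then res ++ ("-spec".toList) else res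
  String.ofList (PySem.Chars.replace res ("--".toList) ("-".toList))

-- ===== PRECONDITION & SPEC =====
def Spec_to_specname (inname : String) (out : String) : Prop := out = to_specname_alt inname
instance (inname : String) (out : String) : Decidable (Spec_to_specname inname out) := by unfold Spec_to_specname; infer_instance

-- ===== CLAIM (what is proved, stated in full; the proofs are below) =====
def Claim_equal_to_specname : Prop := ∀ (inname : String), Dom_to_specname inname → Spec_to_specname inname (to_specname inname)

-- ===== LEMMAS AND PROOFS =====

-- proof-side window recursion both middles are reduced to
def nextLowerB : List Char → Bool
  | [] => false
  | r :: _ => PySem.Chars.islower r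

def prevLowerB : Option Char → Bool
  | none => false
  | some p => PySem.Chars.islower p

def camelW : Option Char → List Char → List Char
  | _, [] => []
  | prev, c :: rest =>
    (if prev.isSome && PySem.Chars.isupper c && (nextLowerB rest || prevLowerB prev) then ['-'] else [])
    ++ PySem.Chars.lowerChar c :: camelW (some c) rest

-- A's index loop: the char A's loop body emits at a valid index j
def prevAt (cs : List Char) (j : ℕ) : Option Char :=
  if j = 0 then none else some (cs.getD (j-1) ' ')

def pieceA (cs : List Char) (j : ℕ) : List Char :=
  (if (prevAt cs j).isSome && PySem.Chars.isupper (cs.getD j ' ') &&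
      (nextLowerB (cs.drop (j+1)) || prevLowerB (prevAt cs j)) then ['-'] else [])
  ++ [PySem.Chars.lowerChar (cs.getD j ' ')]

theorem bodyA_step (cs : List Char) (j : ℕ) (hjn : j < cs.length) (acc : List Char) :
    ((if PySem.Chars.isupper (PySem.List.pyGetD cs (j : Int) ' ') then
        (if (j : Int) ≠ 0 then
          (if (j : Int) + 1 < (cs.length : Int) ∧
              PySem.Chars.islower (PySem.List.pyGetD cs ((j : Int)+1) ' ') then
             acc ++ ['-']
           else if PySem.Chars.islower (PySem.List.pyGetD cs ((j : Int)-1) ' ') then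
             acc ++ ['-']
           else acc)
         else if (j : Int) ≠ 0 ∧ (j : Int) + 1 = (cs.length : Int) then acc ++ ['-'] else acc)
      else acc) ++ [PySem.Chars.lowerChar (PySem.List.pyGetD cs (j : Int) ' ')])
    = acc ++ pieceA cs j := by
  have hget : PySem.List.pyGetD cs ((j : ℕ) : Int) ' ' = cs.getD j ' ' :=
    PySem.List.pyGetD_natCast cs j ' '
  have hget1 : PySem.List.pyGetD cs (((j : ℕ) : Int) + 1) ' ' = cs.getD (j+1) ' ' := by
    have h : (((j : ℕ) : Int) + 1) = ((j + 1 : ℕ) : Int) := by push_cast; ring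
    rw [h, PySem.List.pyGetD_natCast]
  have hnext : nextLowerB (cs.drop (j+1))
      = (if j + 1 < cs.length then PySem.Chars.islower (cs.getD (j+1) ' ') else false) := by
    by_cases hlt : j + 1 < cs.length
    · have hd : cs.drop (j+1) = cs.getD (j+1) ' ' :: cs.drop (j+2) := by
        rw [List.getD_eq_getElem _ _ hlt]
        exact List.drop_eq_getElem_cons hlt
      rw [hd, if_pos hlt]; rfl
    · rw [List.drop_eq_nil_of_le (by omega), if_neg hlt]; rfl
  by_cases hj0 : j = 0
  · subst hj0
    have h0 : ¬ (((0 : ℕ) : Int) ≠ 0) := by simp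
    rw [pieceA]
    rw [if_neg h0] at *
    have hdead : ¬ (((0 : ℕ) : Int) ≠ 0 ∧ ((0 : ℕ) : Int) + 1 = (cs.length : Int)) := by simp
    rw [if_neg hdead, ite_self, hget]
    have : prevAt cs 0 = none := rfl
    rw [this]
    simp
  · have hne : ((j : ℕ) : Int) ≠ 0 := by
      simpa using (fun h => hj0 (by exact_mod_cast h))
    have hgetm1 : PySem.List.pyGetD cs (((j : ℕ) : Int) - 1) ' ' = cs.getD (j-1) ' ' := by
      have h : (((j : ℕ) : Int) - 1) = ((j - 1 : ℕ) : Int) := by omega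
      rw [h, PySem.List.pyGetD_natCast]
    have hprev : prevAt cs j = some (cs.getD (j-1) ' ') := if_neg hj0
    rw [pieceA, hprev, hget, hget1, hgetm1, if_pos hne, hnext]
    by_cases hu : PySem.Chars.isupper (cs.getD j ' ') = true
    · rw [if_pos hu]
      by_cases hlt : j + 1 < cs.length
      · have hlt' : ((j : ℕ) : Int) + 1 < (cs.length : Int) := by exact_mod_cast hlt
        rw [if_pos hlt]
        by_cases hl : PySem.Chars.islower (cs.getD (j+1) ' ') = true
        · rw [if_pos ⟨hlt', hl⟩]
          simp only [List.getD_eq_getElem?_getD] at hu hl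
          simp [hu, hl]
        · rw [if_neg (by rintro ⟨_, h⟩; exact hl h)]
          by_cases hpl : PySem.Chars.islower (cs.getD (j-1) ' ') = true
          · rw [if_pos hpl]
            simp only [List.getD_eq_getElem?_getD] at hu hl hpl
            simp [hu, hl, hpl, prevLowerB]
          · rw [if_neg hpl]
            simp only [List.getD_eq_getElem?_getD] at hu hl hpl
            simp [hu, hl, hpl, prevLowerB]
      · have hlt' : ¬ (((j : ℕ) : Int) + 1 < (cs.length : Int)) := by
          intro hc; exact hlt (by exact_mod_cast hc)
        rw [if_neg hlt]
        rw [if_neg (by rintro ⟨h, _⟩; exact hlt' h)]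
        by_cases hpl : PySem.Chars.islower (cs.getD (j-1) ' ') = true
        · rw [if_pos hpl]
          simp only [List.getD_eq_getElem?_getD] at hu hpl
          simp [hu, hpl, prevLowerB, List.append_assoc]
        · rw [if_neg hpl]
          simp only [List.getD_eq_getElem?_getD] at hu hpl
          simp [hu, hpl, prevLowerB]
    · rw [if_neg hu]
      simp only [List.getD_eq_getElem?_getD] at hu
      simp [hu]

theorem camelW_drop_step (cs : List Char) (j : ℕ) (hjn : j < cs.length) :
    camelW (prevAt cs j) (cs.drop j)
      = pieceA cs j ++ camelW (prevAt cs (j+1)) (cs.drop (j+1)) := by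
  have hd : cs.drop j = cs.getD j ' ' :: cs.drop (j+1) := by
    rw [List.getD_eq_getElem _ _ hjn]
    exact List.drop_eq_getElem_cons hjn
  rw [hd, camelW, pieceA]
  have hp1 : prevAt cs (j+1) = some (cs.getD j ' ') := by
    simp [prevAt]
  rw [hp1]
  simp [prevLowerB, List.append_assoc]

theorem a_fold_eq_camelW (cs : List Char) : ∀ (m j : ℕ) (acc : List Char), j + m = cs.length →
    (PySem.List.pyRange (j : Int) (cs.length : Int) 1).foldl (fun chars i =>
      let chars :=
        if PySem.Chars.isupper (PySem.List.pyGetD cs i ' ') then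
          (if i ≠ 0 then
            (if i + 1 < (cs.length : Int) ∧ PySem.Chars.islower (PySem.List.pyGetD cs (i+1) ' ') then
               chars ++ ['-']
             else if PySem.Chars.islower (PySem.List.pyGetD cs (i-1) ' ') then
               chars ++ ['-']
             else chars)
           else if i ≠ 0 ∧ i + 1 = (cs.length : Int) then chars ++ ['-'] else chars)
        else chars
      chars ++ [PySem.Chars.lowerChar (PySem.List.pyGetD cs i ' ')]) acc
    = acc ++ camelW (prevAt cs j) (cs.drop j) := by
  intro m
  induction m with
  | zero =>
    intro j acc h
    rw [PySem.List.pyRange_one_eq_nil (by omega)]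
    rw [List.drop_eq_nil_of_le (by omega)]
    simp [camelW]
  | succ m ih =>
    intro j acc h
    have hjn : j < cs.length := by omega
    rw [PySem.List.pyRange_one_cons (by exact_mod_cast hjn), List.foldl_cons]
    have hstep : ((j : ℕ) : Int) + 1 = ((j + 1 : ℕ) : Int) := by push_cast; ring
    have ih' := ih (j+1)
    rw [← hstep] at ih'
    rw [ih' _ (by omega)]
    dsimp only
    rw [bodyA_step cs j hjn acc, camelW_drop_step cs j hjn, List.append_assoc]


-- ---- B side: boundaries + slices + join reduced to camelW ----

-- the boundary predicate of B's stage 1 (definitionally the port's filter lambda)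
def condB (cs : List Char) (i : Int) : Bool :=
  PySem.Chars.isupper (PySem.List.pyGetD cs i ' ') &&
  (PySem.Chars.islower (PySem.List.pyGetD cs (i-1) ' ') ||
   strIslower (PySem.List.slice cs (some (i+1)) (some (i+2))))

def bsFrom (cs : List Char) (a : Int) : List Int :=
  (PySem.List.pyRange a (cs.length : Int) 1).filter (condB cs)

def wordsOf (cs : List Char) (a : Int) (l : List Int) : List (List Char) :=
  (List.zip (a :: l) (l ++ [(cs.length : Int)])).map
    (fun ab => PySem.List.slice cs (some ab.1) (some ab.2))

def JL (cs : List Char) (a : Int) (l : List Int) : List Char :=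
  (PySem.Chars.join ['-'] (wordsOf cs a l)).map PySem.Chars.lowerChar

theorem islower_not_isupper (c : Char) :
    PySem.Chars.islower c = true → PySem.Chars.isupper c = false := by
  simp [PySem.Chars.islower, PySem.Chars.isupper, Char.le_def, UInt32.le_iff_toNat_le]
  intro h1 h2
  omega

theorem strIslower_singleton (c : Char) : strIslower [c] = PySem.Chars.islower c := by
  by_cases h : PySem.Chars.islower c = true
  · simp [strIslower, h, islower_not_isupper c h]
  · simp [strIslower] at *
    simp [h]

theorem drop_cons_getD (cs : List Char) (j : ℕ) (hj : j < cs.length) :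
    cs.drop j = cs.getD j ' ' :: cs.drop (j+1) := by
  rw [List.getD_eq_getElem _ _ hj]
  exact List.drop_eq_getElem_cons hj

theorem slice_head (cs : List Char) (j : ℕ) (b : Int) (hj : j < cs.length)
    (hjb : (j : Int) < b) :
    PySem.List.slice cs (some (j : Int)) (some b)
      = cs.getD j ' ' :: PySem.List.slice cs (some ((j : Int)+1)) (some b) := by
  have hb0 : (0 : Int) ≤ b := by omega
  rw [PySem.List.slice_toNat cs (by positivity) hb0,
      PySem.List.slice_toNat cs (by positivity) hb0]
  have h1 : ((j : Int)).toNat = j := Int.toNat_natCast j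
  have h2 : ((j : Int)+1).toNat = j + 1 := by omega
  have h3 : j + 1 ≤ b.toNat := by omega
  rw [h1, h2, drop_cons_getD cs j hj]
  have h4 : b.toNat - j = (b.toNat - (j+1)) + 1 := by omega
  rw [h4, List.take_succ_cons]

theorem join_cons_head (sep : List Char) (c : Char) (w : List Char) (ws : List (List Char)) :
    PySem.Chars.join sep ((c :: w) :: ws) = c :: PySem.Chars.join sep (w :: ws) := by
  cases ws with
  | nil => rw [PySem.Chars.join_singleton, PySem.Chars.join_singleton]
  | cons b l => rw [PySem.Chars.join_cons_cons, PySem.Chars.join_cons_cons]; simp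

theorem mem_bsFrom (cs : List Char) (a x : Int) (hx : x ∈ bsFrom cs a) :
    a ≤ x ∧ x < (cs.length : Int) := by
  have := List.mem_filter.mp hx
  exact (PySem.List.mem_pyRange_one).mp this.1

-- shifting the first word's start one char right when no break sits at j+1
theorem JL_step_nobreak (cs : List Char) (j : ℕ) (l : List Int) (hj : j < cs.length)
    (hl : ∀ x ∈ l, (j : Int) < x) :
    JL cs (j : Int) l = PySem.Chars.lowerChar (cs.getD j ' ') :: JL cs ((j : Int)+1) l := by
  cases l with
  | nil =>
    unfold JL wordsOf
    simp only [List.zip_cons_cons, List.zip_nil_right, List.map_cons, List.map_nil,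
      List.nil_append]
    rw [slice_head cs j _ hj (by exact_mod_cast hj), join_cons_head, List.map_cons]
  | cons b t =>
    unfold JL wordsOf
    simp only [List.cons_append, List.zip_cons_cons, List.map_cons]
    rw [slice_head cs j b hj (hl b (by simp)), join_cons_head, List.map_cons]

-- a break at j+1 contributes the dash
theorem JL_step_break (cs : List Char) (j : ℕ) (l : List Int) (hj : j + 1 < cs.length) :
    JL cs (j : Int) (((j : Int)+1) :: l)
      = PySem.Chars.lowerChar (cs.getD j ' ') :: '-' :: JL cs ((j : Int)+1) l := by
  have hj' : j < cs.length := by omega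
  have hslice : PySem.List.slice cs (some (j : Int)) (some ((j : Int)+1))
      = [cs.getD j ' '] := by
    rw [slice_head cs j _ hj' (by omega)]
    rw [PySem.List.slice_toNat cs (by positivity) (by positivity)]
    simp
  unfold JL wordsOf
  simp only [List.cons_append, List.zip_cons_cons, List.map_cons]
  rw [hslice]
  have hne : ∀ (ws : List (List Char)) (w : List Char),
      PySem.Chars.join ['-'] ([cs.getD j ' '] :: w :: ws)
        = cs.getD j ' ' :: '-' :: PySem.Chars.join ['-'] (w :: ws) := by
    intro ws w
    rw [PySem.Chars.join_cons_cons]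
    simp
  cases l with
  | nil =>
    simp only [List.zip_cons_cons, List.zip_nil_right, List.map_cons, List.map_nil,
      List.nil_append]
    rw [hne]
    simp only [List.map_cons]
    rw [show PySem.Chars.lowerChar '-' = '-' from by decide]
  | cons b t =>
    simp only [List.cons_append, List.zip_cons_cons, List.map_cons]
    rw [hne]
    simp only [List.map_cons]
    rw [show PySem.Chars.lowerChar '-' = '-' from by decide]

-- the boundary predicate agrees with camelW's dash condition at an interior index
theorem condB_eq (cs : List Char) (k : ℕ) (hk1 : 1 ≤ k) (hkn : k < cs.length) :
    condB cs (k : Int)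
      = (PySem.Chars.isupper (cs.getD k ' ') &&
         (nextLowerB (cs.drop (k+1)) || PySem.Chars.islower (cs.getD (k-1) ' '))) := by
  unfold condB
  have hget : PySem.List.pyGetD cs ((k : ℕ) : Int) ' ' = cs.getD k ' ' :=
    PySem.List.pyGetD_natCast cs k ' '
  have hgetm1 : PySem.List.pyGetD cs (((k : ℕ) : Int) - 1) ' ' = cs.getD (k-1) ' ' := by
    have h : (((k : ℕ) : Int) - 1) = ((k - 1 : ℕ) : Int) := by omega
    rw [h, PySem.List.pyGetD_natCast]
  have hcast : ((k : ℕ) : Int) + 1 = ((k + 1 : ℕ) : Int) := by push_cast; ring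
  have hcast2 : ((k : ℕ) : Int) + 2 = ((k + 1 : ℕ) : Int) + 1 := by push_cast; ring
  have hslice : PySem.List.slice cs (some ((k : Int)+1)) (some ((k : Int)+2))
      = (cs.drop (k+1)).take 1 := by
    have hcast3 : (k : Int) + 2 = ((k+2 : ℕ) : Int) := by push_cast; ring
    rw [hcast3, hcast, PySem.List.slice_natCast cs (k+1) (k+2)]
    have : k + 2 - (k + 1) = 1 := by omega
    rw [this]
  have hnext : strIslower ((cs.drop (k+1)).take 1) = nextLowerB (cs.drop (k+1)) := by
    by_cases hlt : k + 1 < cs.length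
    · rw [drop_cons_getD cs (k+1) hlt, List.take_succ_cons, List.take_zero,
        strIslower_singleton]
      rfl
    · rw [List.drop_eq_nil_of_le (by omega)]
      simp [strIslower, nextLowerB]
  rw [hget, hgetm1, hslice, hnext, Bool.or_comm]

-- main B lemma: stage-1 breaks + stage-2 slices/join/lower = camelW (minus leading dash)
theorem b_eq_camelW (cs : List Char) : ∀ (m j : ℕ), j + (m + 1) = cs.length →
    JL cs (j : Int) (bsFrom cs ((j : Int) + 1))
      = PySem.Chars.lowerChar (cs.getD j ' ')
          :: camelW (some (cs.getD j ' ')) (cs.drop (j+1)) := by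
  intro m
  induction m with
  | zero =>
    intro j h
    have hj : j < cs.length := by omega
    have hbs : bsFrom cs ((j : Int) + 1) = [] := by
      unfold bsFrom
      rw [PySem.List.pyRange_one_eq_nil (by omega)]
      rfl
    have hslice : PySem.List.slice cs (some (j : Int)) (some (cs.length : Int))
        = [cs.getD j ' '] := by
      rw [slice_head cs j _ hj (by exact_mod_cast hj)]
      rw [PySem.List.slice_toNat cs (by positivity) (by positivity)]
      rw [show ((j : Int)+1).toNat = j + 1 by omega]
      rw [List.drop_eq_nil_of_le (by omega)]
      simp
    rw [hbs]
    unfold JL wordsOf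
    simp only [List.zip_cons_cons, List.zip_nil_right, List.map_cons, List.map_nil,
      List.nil_append]
    rw [hslice, PySem.Chars.join_singleton, List.drop_eq_nil_of_le (by omega)]
    simp [camelW]
  | succ m ih =>
    intro j h
    have hj1 : j + 1 < cs.length := by omega
    have hsplit : bsFrom cs ((j : Int) + 1)
        = (if condB cs ((j : Int)+1) then ((j : Int)+1) :: bsFrom cs ((j : Int)+2)
           else bsFrom cs ((j : Int)+2)) := by
      unfold bsFrom
      rw [PySem.List.pyRange_one_cons (by exact_mod_cast hj1)]
      rw [List.filter_cons, show (j : Int) + 1 + 1 = (j : Int) + 2 by ring]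
    have hcast : ((j : Int) + 2) = (((j+1 : ℕ) : Int) + 1) := by push_cast; ring
    have hcast1 : ((j : Int) + 1) = ((j+1 : ℕ) : Int) := by push_cast; ring
    have ihj := ih (j+1) (by omega)
    have hdropj : cs.drop (j+1) = cs.getD (j+1) ' ' :: cs.drop (j+2) :=
      drop_cons_getD cs (j+1) hj1
    have hcond := condB_eq cs (j+1) (by omega) hj1
    simp only [Nat.add_sub_cancel] at hcond
    rw [show j + 1 + 1 = j + 2 from rfl] at hcond ihj
    by_cases hc : condB cs ((j : Int)+1) = true
    · have hc' : (PySem.Chars.isupper (cs.getD (j+1) ' ') &&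
          (nextLowerB (cs.drop (j+2)) || PySem.Chars.islower (cs.getD j ' '))) = true := by
        rw [← hcond, ← hcast1]; exact hc
      rw [hsplit, if_pos hc, JL_step_break cs j _ hj1, hcast1, hcast, ihj, hdropj]
      simp only [camelW, Option.isSome_some, Bool.true_and, prevLowerB, hc']
      simp
    · have hc' : (PySem.Chars.isupper (cs.getD (j+1) ' ') &&
          (nextLowerB (cs.drop (j+2)) || PySem.Chars.islower (cs.getD j ' '))) = false := by
        rw [← hcond, ← hcast1]; simpa using hc
      have hmem : ∀ x ∈ bsFrom cs ((j : Int)+2), (j : Int) < x := by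
        intro x hx
        have := mem_bsFrom cs _ x hx
        omega
      rw [hsplit, if_neg hc, JL_step_nobreak cs j _ (by omega) hmem, hcast1, hcast, ihj,
        hdropj]
      simp only [camelW, Option.isSome_some, Bool.true_and, prevLowerB, hc']
      simp

theorem b_top (cs : List Char) : camelW none cs = JL cs 0 (bsFrom cs 1) := by
  cases cs with
  | nil =>
    unfold JL wordsOf bsFrom
    rw [PySem.List.pyRange_one_eq_nil (by norm_num)]
    simp [camelW, PySem.List.slice, PySem.Chars.join_singleton]
  | cons c rest =>
    have h := b_eq_camelW (c :: rest) rest.length 0 (by simp)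
    simp only [Nat.cast_zero, zero_add] at h
    rw [h]
    simp [camelW, nextLowerB, prevLowerB]

-- ===== VERDICT (by name: the statement is the Claim_ definition above) =====
theorem to_specname_spec : Claim_equal_to_specname := by
  intro inname _
  unfold Spec_to_specname to_specname to_specname_alt
  dsimp only
  generalize (PySem.Str.replace (PySem.Str.replace inname "_" "-") " " "-").toList = cs
  have hA := a_fold_eq_camelW cs cs.length 0 []
  simp only [Nat.cast_zero] at hA
  rw [hA (by omega)]
  have hp0 : prevAt cs 0 = none := rfl
  rw [hp0, List.drop_zero, List.nil_append, b_top cs]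
  rfl
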